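-- pv_equiv track=rewrite | github.com/KacperJarosik/Advent-of-code-2025-Python | day03/day03.py | part2
-- ===== SOURCE A (Python) =====
-- def part2(lines: list[str], required_length: int = 12) -> int:
--     """
--     Part 2:
--     Given each numeric string (battery bank), reduce it to exactly 'required_length' digits
--     while preserving maximum lexicographic value using a monotonic decreasing stack.
--     """
--     total = 0
--     for line in lines:
--         digits = [int(c) for c in line]
--         drop = len(digits) - required_length
--         stack = []
--         for d in digits:
--             while stack and drop > 0 and stack[-1] < d:
--                 stack.pop()
--                 drop -= 1
--             stack.append(d)
--         final_digits = stack[:required_length]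
--         total += int("".join(map(str, final_digits)))
--     return total
-- ===== SOURCE B (Python) =====
-- def part2(lines: list[str], required_length: int = 12) -> int:
--     """
--     Same result via greedy windowed selection instead of a monotonic stack:
--     pick each output digit as the max of the feasible window, advancing past it.
--     """
--     total = 0
--     for line in lines:
--         digits = [int(c) for c in line]
--         n = len(digits)
--         k = min(required_length, n)
--         selected = []
--         start = 0
--         for i in range(k):
--             window = digits[start : n - (k - i) + 1]
--             m = max(window)
--             selected.append(m)
--             start += window.index(m) + 1
--         total += int("".join(map(str, selected)))
--     return total
-- ===== Notes on version B (the rewrite author's own statement) =====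
-- stated objective: alternative
-- what changed: Replaces the monotonic-stack digit-dropping pass with greedy windowed selection: each output digit is chosen as the first maximum of the feasible window digits[start : n-(k-i)+1], advancing start past it.
-- outside the precondition, e.g. on part2(['21'], -1): A returns 2, B raises ValueError
import Mathlib
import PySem

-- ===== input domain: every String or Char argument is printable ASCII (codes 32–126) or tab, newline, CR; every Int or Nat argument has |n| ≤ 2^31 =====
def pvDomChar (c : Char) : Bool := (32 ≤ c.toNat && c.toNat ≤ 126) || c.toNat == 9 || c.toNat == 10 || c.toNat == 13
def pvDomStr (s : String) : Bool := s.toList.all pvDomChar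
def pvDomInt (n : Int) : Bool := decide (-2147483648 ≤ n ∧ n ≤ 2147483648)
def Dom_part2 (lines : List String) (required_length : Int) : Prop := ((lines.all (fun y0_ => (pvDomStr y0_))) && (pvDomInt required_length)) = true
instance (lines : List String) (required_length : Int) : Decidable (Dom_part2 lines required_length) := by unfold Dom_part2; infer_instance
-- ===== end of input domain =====

-- B replaces A's monotonic-stack digit dropping by greedy windowed maximum selection (same result, similar cost).

-- ===== PORT A =====
-- the inner 'while stack and drop > 0 and stack[-1] < d' loop; stack is kept top-first (Python's stack[-1] is the head)
def pvPopWhile (stack : List Int) (drop : Int) (d : Int) : List Int × Int :=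
  match stack with
  | [] => ([], drop)
  | t :: rest => if 0 < drop ∧ t < d then pvPopWhile rest (drop - 1) d else (t :: rest, drop)

-- one iteration of 'for d in digits'
def pvStep (st : List Int × Int) (d : Int) : List Int × Int :=
  (d :: (pvPopWhile st.1 st.2 d).1, (pvPopWhile st.1 st.2 d).2)

-- the body of A's 'for line in lines' iteration
def pvLineA (line : String) (required_length : Int) : Int :=
  -- int(c): exact on digit characters, which Pre_ guarantees
  let digits := line.toList.map (fun c => (c.toNat : Int) - 48)
  let drop := (digits.length : Int) - required_length
  let st := digits.foldl pvStep ([], drop)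
  -- stack[:required_length]: exact for required_length ≥ 0 (Pre_ gives ≥ 1); stack is top-first, so reverse
  let final_digits := (st.1.reverse).take required_length.toNat
  -- int("".join(map(str, final_digits))): exact on nonempty lists of digits 0..9 (Pre_)
  final_digits.foldl (fun a d => 10 * a + d) 0

def part2 (lines : List String) (required_length : Int) : Int :=
  lines.foldl (fun total line => total + pvLineA line required_length) 0

-- ===== PORT B =====
-- the 'for i in range(k)' loop of Source B; rem = k - i, start is the Python start index
def pvGreedySel (digits : List Int) (rem : Nat) (start : Int) : List Int :=
  match rem with
  | 0 => []
  | r + 1 =>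
    let window := PySem.List.slice digits (some start) (some ((digits.length : Int) - (r + 1) + 1))
    match PySem.List.max? window (fun y => y) with
    | none => []   -- Python: max([]) raises ValueError; unreachable under Pre_
    | some m =>
      m :: pvGreedySel digits r (start + (((PySem.List.index? window m).getD 0 : Nat) + 1))

-- the body of Source B's 'for line in lines' iteration
def pvLineB (line : String) (required_length : Int) : Int :=
  let digits := line.toList.map (fun c => (c.toNat : Int) - 48)
  let k := min required_length (digits.length : Int)
  let selected := pvGreedySel digits k.toNat 0
  selected.foldl (fun a d => 10 * a + d) 0

def part2_alt (lines : List String) (required_length : Int) : Int :=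
  lines.foldl (fun total line => total + pvLineB line required_length) 0

-- ===== PRECONDITION & SPEC =====
-- Pre_ excludes inputs where A raises ValueError (a non-digit character, an empty line, or required_length ≤ 0 on a
-- nonempty lines list, where int("") fails) — except that for required_length < 0 on long-enough lines A still returns
-- a value via the accidental negative slice stack[:required_length]; B's algorithm naturally raises there (empty
-- selection), so those inputs are excluded too; an empty lines list stays admitted for every required_length (no line is processed).
def Pre_part2 (lines : List String) (required_length : Int) : Prop :=
  (1 ≤ required_length ∨ lines = []) ∧
    ∀ line ∈ lines, line.toList ≠ [] ∧ line.toList.all PySem.Chars.isdigit = true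
instance (lines : List String) (required_length : Int) : Decidable (Pre_part2 lines required_length) := by
  unfold Pre_part2; infer_instance

def pvWitness_part2 : List String × Int := (["3141592", "987"], 3)

def Spec_part2 (lines : List String) (required_length : Int) (out : Int) : Prop := out = part2_alt lines required_length
instance (lines : List String) (required_length : Int) (out : Int) : Decidable (Spec_part2 lines required_length out) := by unfold Spec_part2; infer_instance

-- ===== CLAIM (what is proved, stated in full; the proofs are below) =====
def Claim_equal_part2 : Prop := ∀ (lines : List String) (required_length : Int), Dom_part2 lines required_length → Pre_part2 lines required_length → Spec_part2 lines required_length (part2 lines required_length)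

-- ===== LEMMAS AND PROOFS =====

-- suffix-form specification of the greedy selection (proof-side only)
def gspec (xs : List Int) : Nat → List Int
  | 0 => []
  | r + 1 =>
    match PySem.List.max? (xs.take (xs.length - r)) (fun y => y) with
    | none => []
    | some m => gspec (xs.drop (((PySem.List.index? (xs.take (xs.length - r)) m).getD 0) + 1)) r |> (m :: ·)

-- pvPopWhile invariants
theorem popWhile_inv (s : List Int) (b d : Int) :
    (pvPopWhile s b d).2 - ((pvPopWhile s b d).1.length : Int) = b - s.length := by
  induction s generalizing b with
  | nil => simp [pvPopWhile]
  | cons t rest ih =>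
    simp only [pvPopWhile]
    split_ifs with h
    · rw [ih]; simp only [List.length_cons]; push_cast; ring
    · rfl

theorem popWhile_subset (s : List Int) (b d : Int) (x : Int) (hx : x ∈ (pvPopWhile s b d).1) : x ∈ s := by
  induction s generalizing b with
  | nil => simp [pvPopWhile] at hx
  | cons t rest ih =>
    simp only [pvPopWhile] at hx
    split_ifs at hx with h
    · exact List.mem_cons_of_mem _ (ih _ hx)
    · exact hx

theorem popWhile_nopop (s : List Int) (b d : Int) (hb : b ≤ 0) : pvPopWhile s b d = (s, b) := by
  cases s with
  | nil => rfl
  | cons t rest => simp only [pvPopWhile]; rw [if_neg]; rintro ⟨h1, -⟩; omega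

theorem popWhile_all (s : List Int) (b d : Int) (hlt : ∀ x ∈ s, x < d) (hb : (s.length : Int) ≤ b) :
    pvPopWhile s b d = ([], b - s.length) := by
  induction s generalizing b with
  | nil => simp [pvPopWhile]
  | cons t rest ih =>
    simp only [pvPopWhile]
    have h1 : 0 < b := by simp only [List.length_cons] at hb; push_cast at hb; omega
    rw [if_pos ⟨h1, hlt t (List.mem_cons_self)⟩,
        ih (b - 1) (fun x hx => hlt x (List.mem_cons_of_mem _ hx))
          (by simp only [List.length_cons] at hb; push_cast at hb ⊢; omega)]
    simp only [List.length_cons, Prod.mk.injEq, true_and]; push_cast; ring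

theorem popWhile_append (s : List Int) (b d m : Int) (h : d ≤ m ∨ b - (s.length : Int) ≤ 0) :
    pvPopWhile (s ++ [m]) b d = ((pvPopWhile s b d).1 ++ [m], (pvPopWhile s b d).2) := by
  induction s generalizing b with
  | nil =>
    simp only [pvPopWhile, List.nil_append]
    rw [if_neg]; rintro ⟨h1, h2⟩
    simp at h
    rcases h with h | h
    · omega
    · omega
  | cons t rest ih =>
    simp only [pvPopWhile, List.cons_append]
    split_ifs with hc
    · refine ih (b - 1) ?_
      rcases h with h | h
      · exact Or.inl h
      · refine Or.inr ?_
        simp only [List.length_cons] at h; push_cast at h ⊢; omega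
    · rfl

-- fold invariants
theorem run_inv (p : List Int) (s : List Int) (b : Int) :
    (p.foldl pvStep (s, b)).2 - ((p.foldl pvStep (s, b)).1.length : Int) = b - s.length - p.length ∧
    (∀ x ∈ (p.foldl pvStep (s, b)).1, x ∈ s ∨ x ∈ p) := by
  induction p generalizing s b with
  | nil => simp
  | cons z p' ih =>
    rw [List.foldl_cons]
    have hstep : pvStep (s, b) z = (z :: (pvPopWhile s b z).1, (pvPopWhile s b z).2) := rfl
    rw [hstep]
    obtain ⟨ih1, ih2⟩ := ih (z :: (pvPopWhile s b z).1) (pvPopWhile s b z).2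
    have hpw := popWhile_inv s b z
    constructor
    · rw [ih1]; simp at hpw ⊢; omega
    · intro x hx
      rcases ih2 x hx with hx' | hx'
      · rcases List.mem_cons.mp hx' with rfl | hx''
        · exact Or.inr List.mem_cons_self
        · exact Or.inl (popWhile_subset s b z x hx'')
      · exact Or.inr (List.mem_cons_of_mem _ hx')

theorem run_nopop (p : List Int) (s : List Int) (b : Int) (hb : b ≤ 0) :
    p.foldl pvStep (s, b) = (p.reverse ++ s, b) := by
  induction p generalizing s with
  | nil => simp
  | cons z p' ih =>
    rw [List.foldl_cons]
    have hstep : pvStep (s, b) z = (z :: s, b) := by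
      simp [pvStep, popWhile_nopop s b z hb]
    rw [hstep, ih (z :: s)]
    simp

theorem run_frozen (zs : List Int) (s : List Int) (b m : Int)
    (h : ∀ q : Nat, ∀ hq : q < zs.length, (q : Int) < b - s.length → zs[q] ≤ m) :
    zs.foldl pvStep (s ++ [m], b) = ((zs.foldl pvStep (s, b)).1 ++ [m], (zs.foldl pvStep (s, b)).2) := by
  induction zs generalizing s b with
  | nil => simp
  | cons z zs' ih =>
    have h0 : z ≤ m ∨ b - (s.length : Int) ≤ 0 := by
      by_cases hc : (0 : Int) < b - s.length
      · exact Or.inl (h 0 (by simp) (by simpa using hc))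
      · exact Or.inr (by omega)
    rw [List.foldl_cons, List.foldl_cons]
    have hstep : pvStep (s ++ [m], b) z
        = ((z :: (pvPopWhile s b z).1) ++ [m], (pvPopWhile s b z).2) := by
      simp [pvStep, popWhile_append s b z m h0]
    rw [hstep]
    have hstep2 : pvStep (s, b) z = (z :: (pvPopWhile s b z).1, (pvPopWhile s b z).2) := rfl
    rw [hstep2]
    have hpw := popWhile_inv s b z
    apply ih
    intro q hq hlt
    have := h (q + 1) (by simpa using Nat.succ_lt_succ hq) (by simp only [List.length_cons] at hlt; push_cast at hlt ⊢; omega)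
    simpa using this

-- the stack pass computes the greedy spec
theorem stack_eq_gspec (k : Nat) : ∀ (xs : List Int), k ≤ xs.length →
    ((xs.foldl pvStep ([], (xs.length : Int) - k)).1.reverse).take k = gspec xs k := by
  induction k with
  | zero => intro xs _; simp [gspec]
  | succ k ih =>
    intro xs hk
    have hwlen : (xs.take (xs.length - k)).length = xs.length - k := by
      rw [List.length_take]; omega
    have hwne : xs.take (xs.length - k) ≠ [] := by
      intro h0
      have := congrArg List.length h0
      rw [hwlen] at this
      simp at this; omega
    obtain ⟨m, hm⟩ : ∃ m, PySem.List.max? (xs.take (xs.length - k)) (fun y => y) = some m := by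
      cases hmm : PySem.List.max? (xs.take (xs.length - k)) (fun y => y) with
      | none => exact absurd ((PySem.List.max?_eq_none_iff _ _).mp hmm) hwne
      | some m => exact ⟨m, rfl⟩
    have hmem : m ∈ xs.take (xs.length - k) := PySem.List.max?_mem hm
    obtain ⟨j, hj⟩ : ∃ j, PySem.List.index? (xs.take (xs.length - k)) m = some j := by
      have hs := (PySem.List.index?_isSome_iff _ m).mpr hmem
      cases hjj : PySem.List.index? (xs.take (xs.length - k)) m with
      | none => rw [hjj] at hs; simp at hs
      | some j => exact ⟨j, rfl⟩
    obtain ⟨hjlt, hxj, hprev⟩ := PySem.List.getElem_of_index?_eq_some hj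
    have hle : ∀ y ∈ xs.take (xs.length - k), y ≤ m := fun y hy => PySem.List.max?_isMax hm y hy
    have hjn : j < xs.length - k := by rwa [hwlen] at hjlt
    have hjlt' : j < xs.length := by omega
    have hxjm : xs[j]'hjlt' = m := by rw [← hxj]; exact (List.getElem_take).symm
    have hdec : xs = xs.take j ++ xs[j]'hjlt' :: xs.drop (j+1) := by
      conv_lhs => rw [← List.take_append_drop j xs, List.drop_eq_getElem_cons hjlt']
    have hfold : ∀ init : List Int × Int, xs.foldl pvStep init
        = (xs.drop (j+1)).foldl pvStep
            (pvStep ((xs.take j).foldl pvStep init) (xs[j]'hjlt')) := by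
      intro init
      conv_lhs => rw [hdec]
      rw [List.foldl_append, List.foldl_cons]
    obtain ⟨hinv1, hinv2⟩ := run_inv (xs.take j) [] ((xs.length : Int) - (k+1))
    have hPlen : (xs.take j).length = j := by rw [List.length_take]; omega
    have hPlt : ∀ x ∈ ((xs.take j).foldl pvStep ([], (xs.length : Int) - (k+1))).1, x < m := by
      intro x hx
      rcases hinv2 x hx with h0 | h0
      · simp at h0
      · obtain ⟨i, hi, hxi⟩ := List.getElem_of_mem h0
        have hij : i < j := by rwa [hPlen] at hi
        have hiw : i < (xs.take (xs.length - k)).length := by omega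
        have hxiw : (xs.take (xs.length - k))[i]'hiw = x := by
          rw [List.getElem_take, ← hxi, List.getElem_take]
        have hne : x ≠ m := by rw [← hxiw]; exact hprev i (by omega)
        have hlex : x ≤ m := hle x (by rw [← hxiw]; exact List.getElem_mem _)
        exact lt_of_le_of_ne hlex hne
    have hst0inv : ((xs.take j).foldl pvStep ([], (xs.length : Int) - (k+1))).2
        - (((xs.take j).foldl pvStep ([], (xs.length : Int) - (k+1))).1.length : Int)
        = ((xs.length : Int) - (k+1)) - j := by
      rw [hinv1, hPlen]; simp
    have hjb : (j : Int) ≤ (xs.length : Int) - (k+1) := by omega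
    have hstepm : pvStep ((xs.take j).foldl pvStep ([], (xs.length : Int) - (k+1))) (xs[j]'hjlt')
        = ([m], ((xs.length : Int) - (k+1)) - j) := by
      rw [hxjm]
      rw [show pvStep ((xs.take j).foldl pvStep ([], (xs.length : Int) - (k+1))) m
            = (m :: (pvPopWhile ((xs.take j).foldl pvStep ([], (xs.length : Int) - (k+1))).1
                ((xs.take j).foldl pvStep ([], (xs.length : Int) - (k+1))).2 m).1,
               (pvPopWhile ((xs.take j).foldl pvStep ([], (xs.length : Int) - (k+1))).1
                ((xs.take j).foldl pvStep ([], (xs.length : Int) - (k+1))).2 m).2) from rfl]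
      rw [popWhile_all _ _ m hPlt (by omega)]
      simp only [Prod.mk.injEq, true_and]
      omega
    have hfro := run_frozen (xs.drop (j+1)) [] (((xs.length : Int) - (k+1)) - j) m (by
      intro q hq hqlt
      simp only [List.length_nil, Nat.cast_zero, sub_zero] at hqlt
      have hq2 : j + 1 + q < xs.length - k := by omega
      have hq3 : j + 1 + q < xs.length := by omega
      have hZq : (xs.drop (j+1))[q] = xs[j+1+q]'hq3 := List.getElem_drop
      rw [hZq, show xs[j+1+q]'hq3 = (xs.take (xs.length - k))[j+1+q]'(by rw [hwlen]; exact hq2)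
            from (List.getElem_take).symm]
      exact hle _ (List.getElem_mem _))
    rw [show ((xs.length : Int)) - ((k+1 : Nat) : Int) = (xs.length : Int) - ((k : Int)+1) from by
          push_cast; ring,
        hfold ([], (xs.length : Int) - ((k : Int)+1)), hstepm,
        show ([m] : List Int) = [] ++ [m] from rfl, hfro]
    rw [List.reverse_append, List.reverse_cons, List.reverse_nil, List.nil_append,
        List.singleton_append, List.take_succ_cons]
    have hZlen : (xs.drop (j+1)).length = xs.length - (j+1) := List.length_drop
    have hbj : ((xs.length : Int) - (k+1)) - j = ((xs.drop (j+1)).length : Int) - k := by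
      rw [hZlen]; omega
    rw [hbj, ih (xs.drop (j+1)) (by omega)]
    conv_rhs => rw [gspec]
    rw [hm]
    dsimp only
    rw [hj]
    rfl

-- B's indexed loop computes the suffix-form spec
theorem greedy_eq_gspec (rem : Nat) : ∀ (xs : List Int) (start : Nat), start + rem ≤ xs.length →
    pvGreedySel xs rem (start : Int) = gspec (xs.drop start) rem := by
  induction rem with
  | zero => intro xs start _; rfl
  | succ r ih =>
    intro xs start h
    have hend : (xs.length : Int) - ((r : Int) + 1) + 1 = ((xs.length - r : Nat) : Int) := by
      rw [Nat.cast_sub (by omega)]; ring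
    have hwin : PySem.List.slice xs (some (start : Int)) (some ((xs.length : Int) - ((r : Int) + 1) + 1))
        = (xs.drop start).take ((xs.drop start).length - r) := by
      rw [hend, PySem.List.slice_natCast, List.length_drop]
      congr 1; omega
    rw [pvGreedySel, gspec]
    simp only [hwin]
    cases hmm : PySem.List.max? ((xs.drop start).take ((xs.drop start).length - r)) (fun y => y) with
    | none => rfl
    | some m =>
      dsimp only
      have hmem : m ∈ (xs.drop start).take ((xs.drop start).length - r) := PySem.List.max?_mem hmm
      obtain ⟨j, hj⟩ : ∃ j, PySem.List.index? ((xs.drop start).take ((xs.drop start).length - r)) m = some j := by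
        have hs := (PySem.List.index?_isSome_iff _ m).mpr hmem
        cases hjj : PySem.List.index? ((xs.drop start).take ((xs.drop start).length - r)) m with
        | none => rw [hjj] at hs; simp at hs
        | some j => exact ⟨j, rfl⟩
      obtain ⟨hjlt, -, -⟩ := PySem.List.getElem_of_index?_eq_some hj
      have hwl : ((xs.drop start).take ((xs.drop start).length - r)).length = xs.length - start - r := by
        rw [List.length_take, List.length_drop]; omega
      have hjb : j < xs.length - start - r := by rwa [hwl] at hjlt
      rw [hj]
      simp only [Option.getD_some]
      have hcast : (start : Int) + ((j : Int) + 1) = ((start + j + 1 : Nat) : Int) := by push_cast; ring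
      rw [hcast, ih xs (start + j + 1) (by omega)]
      rw [show (xs.drop start).drop (j+1) = xs.drop (start + (j+1)) from List.drop_drop]
      rw [show start + (j + 1) = start + j + 1 from by omega]

theorem gspec_full (ds : List Int) : gspec ds ds.length = ds := by
  have h2 := stack_eq_gspec ds.length ds (le_refl _)
  rw [run_nopop ds [] _ (by omega)] at h2
  rw [← h2]
  simp

theorem sel_eq (ds : List Int) (r : Int) (hr : 0 ≤ r) :
    ((ds.foldl pvStep ([], (ds.length : Int) - r)).1.reverse).take r.toNat
      = pvGreedySel ds (min r (ds.length : Int)).toNat 0 := by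
  rcases le_total r (ds.length : Int) with hle | hge
  · rw [min_eq_left hle]
    have hk : ((r.toNat : Nat) : Int) = r := Int.toNat_of_nonneg hr
    rw [show (ds.length : Int) - r = (ds.length : Int) - (r.toNat : Int) from by rw [hk]]
    rw [stack_eq_gspec r.toNat ds (by omega)]
    rw [show (0 : Int) = ((0 : Nat) : Int) from rfl,
        greedy_eq_gspec r.toNat ds 0 (by omega), List.drop_zero]
  · rw [min_eq_right hge, Int.toNat_natCast]
    rw [run_nopop ds [] _ (by omega)]
    simp only [List.append_nil, List.reverse_reverse]
    rw [List.take_of_length_le (by omega)]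
    rw [show (0 : Int) = ((0 : Nat) : Int) from rfl,
        greedy_eq_gspec ds.length ds 0 (by omega), List.drop_zero, gspec_full]

-- ===== VERDICT (by name: the statement is the Claim_ definition above) =====
theorem foldsum_congr {α : Type} (f g : α → Int) (h : ∀ x, f x = g x) :
    ∀ (xs : List α) (t : Int),
      xs.foldl (fun acc x => acc + f x) t = xs.foldl (fun acc x => acc + g x) t := by
  intro xs
  induction xs with
  | nil => intro t; rfl
  | cons x xs ih => intro t; rw [List.foldl_cons, List.foldl_cons, h x]; exact ih _

theorem line_eq (line : String) (r : Int) (hr : 0 ≤ r) : pvLineA line r = pvLineB line r := by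
  unfold pvLineA pvLineB
  dsimp only
  rw [sel_eq (line.toList.map (fun c => (c.toNat : Int) - 48)) r hr]

theorem part2_eq_alt (lines : List String) (r : Int) (hr : 0 ≤ r) :
    part2 lines r = part2_alt lines r := by
  unfold part2 part2_alt
  exact foldsum_congr (fun line => pvLineA line r) (fun line => pvLineB line r)
    (fun line => line_eq line r hr) lines 0

theorem part2_spec : Claim_equal_part2 := by
  intro lines r _ hpre
  unfold Spec_part2
  rcases hpre.1 with h1 | rfl
  · exact part2_eq_alt lines r (by omega)
  · rfl
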